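-- pv_equiv track=rewrite | github.com/LuizYokoyama/chatBot_Vendedor_Virtual | actions/actions.py | dizerCores
-- ===== SOURCE A (Python) =====
-- def dizerCores(cores):
-- 	'''Retorna uma string para o bot usar, com todas as cores disponíveis'''
-- 	r = ''
-- 	l = list(cores)
-- 	i = len(l)
-- 	for c in l:
-- 		i -= 1
-- 		if i == 1:
-- 		  r += c + ' e '
-- 		elif i == 0:
-- 		  r += c
-- 		else:
-- 		  r += c + ', '
-- 	return r
-- ===== SOURCE B (Python) =====
-- def dizerCores(cores):
--     '''Retorna uma string para o bot usar, com todas as cores disponíveis'''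
--     l = list(cores)
--     if not l:
--         return ''
--     if len(l) == 1:
--         return l[0]
--     return ', '.join(l[:-1]) + ' e ' + l[-1]
-- ===== Notes on version B (the rewrite author's own statement) =====
-- stated objective: idiomatic
-- what changed: Replaces the per-element loop with a descending counter choosing a separator for each element by explicit length base cases plus a single ', '.join of all-but-last followed by ' e ' and the last element.
import Mathlib
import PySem

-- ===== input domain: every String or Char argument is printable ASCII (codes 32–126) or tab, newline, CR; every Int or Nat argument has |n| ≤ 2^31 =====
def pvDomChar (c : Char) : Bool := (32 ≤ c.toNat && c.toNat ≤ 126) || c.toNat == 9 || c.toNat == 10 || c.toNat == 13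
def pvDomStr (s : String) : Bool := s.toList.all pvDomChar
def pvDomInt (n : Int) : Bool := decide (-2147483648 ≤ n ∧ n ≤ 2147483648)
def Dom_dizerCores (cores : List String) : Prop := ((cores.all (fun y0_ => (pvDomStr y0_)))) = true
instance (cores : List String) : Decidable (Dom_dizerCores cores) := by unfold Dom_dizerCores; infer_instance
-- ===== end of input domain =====

-- B replaces A's counter-driven separator loop by explicit length base cases plus ', '.join of all-but-last and ' e ' + last (idiomatic decomposition, same cost).


-- ===== PORT A =====
-- one loop iteration of A: i -= 1, then append c with a separator chosen by i
def pvStepA (st : String × Int) (c : String) : String × Int :=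
  let i := st.2 - 1
  if i = 1 then (st.1 ++ (c ++ " e "), i)
  else if i = 0 then (st.1 ++ c, i)
  else (st.1 ++ (c ++ ", "), i)

def dizerCores (cores : List String) : String :=
  (List.foldl pvStepA ("", (cores.length : Int)) cores).1

-- ===== PORT B =====
def dizerCores_alt (cores : List String) : String :=
  match cores with
  | [] => ""
  | [c] => c
  | c :: d :: t =>
      PySem.Str.join ", " ((c :: d :: t).dropLast) ++ " e " ++ (d :: t).getLast (List.cons_ne_nil d t)

-- ===== PRECONDITION & SPEC =====
def Spec_dizerCores (cores : List String) (out : String) : Prop := out = dizerCores_alt cores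
instance (cores : List String) (out : String) : Decidable (Spec_dizerCores cores out) := by unfold Spec_dizerCores; infer_instance

-- ===== CLAIM (what is proved, stated in full; the proofs are below) =====
def Claim_equal_dizerCores : Prop := ∀ (cores : List String), Dom_dizerCores cores → Spec_dizerCores cores (dizerCores cores)

-- ===== LEMMAS AND PROOFS =====

-- what A's loop appends after the accumulator, characterised recursively
def pvTail : List String → String
  | [] => ""
  | c :: t => (if t.length = 1 then c ++ " e " else if t.length = 0 then c else c ++ ", ") ++ pvTail t

theorem pvStepA_eq (r : String) (c : String) (t : List String) :
    pvStepA (r, ((c :: t).length : Int)) c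
      = (r ++ (if t.length = 1 then c ++ " e " else if t.length = 0 then c else c ++ ", "), (t.length : Int)) := by
  simp only [pvStepA, List.length_cons]
  push_cast
  split_ifs <;> simp_all

theorem pvLoopA (l : List String) : ∀ (r : String),
    (List.foldl pvStepA (r, (l.length : Int)) l).1 = r ++ pvTail l := by
  induction l with
  | nil => intro r; simp [pvTail]
  | cons c t ih =>
    intro r
    rw [List.foldl_cons, pvStepA_eq, ih, pvTail, String.append_assoc]

theorem str_join_cons_cons (sep p q : String) (rest : List String) :
    PySem.Str.join sep (p :: q :: rest) = p ++ sep ++ PySem.Str.join sep (q :: rest) := by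
  refine String.toList_inj.mp ?_
  simp [PySem.Str.toList_join, PySem.Chars.join_cons_cons]

theorem pvTail_eq_alt (l : List String) : pvTail l = dizerCores_alt l := by
  induction l with
  | nil => rfl
  | cons c t ih =>
    cases t with
    | nil => simp [pvTail, dizerCores_alt]
    | cons d t' =>
      cases t' with
      | nil =>
        simp [pvTail, dizerCores_alt, PySem.Str.join, PySem.Chars.join_singleton, String.ofList]
      | cons e t'' =>
        rw [pvTail, ih, dizerCores_alt, dizerCores_alt]
        simp only [List.length_cons, List.dropLast_cons₂, str_join_cons_cons,
          List.getLast_cons (List.cons_ne_nil e t'')]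
        split_ifs with h1 h2 <;> first | omega | exact h2.elim | simp [String.append_assoc]

-- ===== VERDICT (by name: the statement is the Claim_ definition above) =====
theorem dizerCores_spec : Claim_equal_dizerCores := by
  intro cores _
  show dizerCores cores = dizerCores_alt cores
  rw [dizerCores, pvLoopA, pvTail_eq_alt]
  simp
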